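-- pv_equiv track=rewrite | github.com/ihmeuw/idd-climate-models | src/idd_climate_models/time_period_functions.py | split_period
-- ===== SOURCE A (Python) =====
-- import math
--
-- def split_period(start_year, end_year, max_width):
--     """
--     Split a time period into bins of at most max_width years,
--     with bin sizes as equal as possible.
--
--     Args:
--         start_year: Starting year of period
--         end_year: Ending year of period
--         max_width: Maximum bin width in years
--
--     Returns:
--         List of (start_year, end_year) tuples
--
--     Example:
--         >>> split_period(2015, 2042, 5)
--         [(2015, 2019), (2020, 2024), (2025, 2029), (2030, 2034), (2035, 2039), (2040, 2042)]
--     """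
--     total_years = end_year - start_year + 1
--
--     # Minimum bins needed
--     n_bins = math.ceil(total_years / max_width)
--
--     # Base size and remainder
--     base_size = total_years // n_bins
--     remainder = total_years % n_bins
--
--     # Create bins: first 'remainder' bins get (base_size + 1), rest get base_size
--     bins = []
--     current_year = start_year
--
--     for i in range(n_bins):
--         bin_size = base_size + (1 if i < remainder else 0)
--         bin_end = current_year + bin_size - 1
--         bins.append((current_year, bin_end))
--         current_year = bin_end + 1
--
--     return bins
-- ===== SOURCE B (Python) =====
-- import math
--
-- def split_period(start_year, end_year, max_width):
--     total_years = end_year - start_year + 1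
--     n_bins = math.ceil(total_years / max_width)
--     base_size = total_years // n_bins
--     remainder = total_years % n_bins
--     return [(start_year + i * base_size + min(i, remainder),
--              start_year + (i + 1) * base_size + min(i + 1, remainder) - 1)
--             for i in range(n_bins)]
-- ===== Notes on version B (the rewrite author's own statement) =====
-- stated objective: alternative
-- what changed: B drops A's loop-carried current_year accumulator and computes each bin independently from a closed-form positional offset start_year + i*base_size + min(i, remainder).
import Mathlib
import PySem

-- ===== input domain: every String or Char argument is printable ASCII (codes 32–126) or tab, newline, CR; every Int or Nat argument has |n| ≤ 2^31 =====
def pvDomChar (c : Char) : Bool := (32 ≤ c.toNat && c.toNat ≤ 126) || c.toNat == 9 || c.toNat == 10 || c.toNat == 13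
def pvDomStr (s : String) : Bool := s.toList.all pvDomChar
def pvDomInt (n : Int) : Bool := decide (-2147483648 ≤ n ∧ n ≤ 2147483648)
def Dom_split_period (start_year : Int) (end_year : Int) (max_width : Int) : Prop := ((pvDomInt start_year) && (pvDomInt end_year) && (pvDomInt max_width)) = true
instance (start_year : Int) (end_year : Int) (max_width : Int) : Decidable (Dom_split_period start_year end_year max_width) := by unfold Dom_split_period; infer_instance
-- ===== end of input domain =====

-- B replaces A's loop-carried current_year accumulator with an independent closed-form
-- formula per bin index (objective: alternative decomposition, same cost).

-- ===== PORT A =====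
-- math.ceil(total/max_width) is ported as exact ceiling division -((-total) // max_width);
-- this is exact on Dom (|ints| ≤ 2^31 < 2^53, so the float quotient's ceil equals the exact ceil).
def split_period (start_year : Int) (end_year : Int) (max_width : Int) : List (Int × Int) :=
  let total_years : Int := end_year - start_year + 1
  let n_bins : Int := -(PySem.Int.floordiv (-total_years) max_width)
  let base_size : Int := PySem.Int.floordiv total_years n_bins
  let remainder : Int := PySem.Int.mod total_years n_bins
  ((PySem.List.pyRange 0 n_bins 1).foldl
    (fun (st : List (Int × Int) × Int) i =>
      let bin_size : Int := base_size + (if i < remainder then 1 else 0)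
      let bin_end : Int := st.2 + bin_size - 1
      (st.1 ++ [(st.2, bin_end)], bin_end + 1))
    ([], start_year)).1

-- ===== PORT B =====
def split_period_alt (start_year : Int) (end_year : Int) (max_width : Int) : List (Int × Int) :=
  let total_years : Int := end_year - start_year + 1
  let n_bins : Int := -(PySem.Int.floordiv (-total_years) max_width)
  let base_size : Int := PySem.Int.floordiv total_years n_bins
  let remainder : Int := PySem.Int.mod total_years n_bins
  (PySem.List.pyRange 0 n_bins 1).map
    (fun i => (start_year + i * base_size + min i remainder,
               start_year + (i + 1) * base_size + min (i + 1) remainder - 1))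

-- ===== PRECONDITION & SPEC =====
-- Pre_ excludes exactly the inputs where A raises ZeroDivisionError: max_width = 0
-- (in the true division) or a non-positive year range making n_bins = 0 (in '//').
def Pre_split_period (start_year : Int) (end_year : Int) (max_width : Int) : Prop :=
  max_width ≠ 0 ∧ -(PySem.Int.floordiv (-(end_year - start_year + 1)) max_width) ≠ 0
instance (start_year : Int) (end_year : Int) (max_width : Int) : Decidable (Pre_split_period start_year end_year max_width) := by unfold Pre_split_period; infer_instance
def pvWitness_split_period : Int × Int × Int := (2015, 2042, 5)
def Spec_split_period (start_year : Int) (end_year : Int) (max_width : Int) (out : List (Int × Int)) : Prop := out = split_period_alt start_year end_year max_width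
instance (start_year : Int) (end_year : Int) (max_width : Int) (out : List (Int × Int)) : Decidable (Spec_split_period start_year end_year max_width out) := by unfold Spec_split_period; infer_instance

-- ===== CLAIM (what is proved, stated in full; the proofs are below) =====
def Claim_equal_split_period : Prop := ∀ (start_year : Int) (end_year : Int) (max_width : Int), Dom_split_period start_year end_year max_width → Pre_split_period start_year end_year max_width → Spec_split_period start_year end_year max_width (split_period start_year end_year max_width)

-- ===== LEMMAS AND PROOFS =====

-- Loop invariant: starting the fold at index j with current_year = s + j*base + min j rem
-- produces exactly the closed-form bins for indices j … j+fuel-1, appended to acc.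
theorem split_loop_eq (base rem s : Int) : ∀ (fuel : Nat) (j : Int) (acc : List (Int × Int)),
    ((PySem.List.pyRange j (j + fuel) 1).foldl
      (fun (st : List (Int × Int) × Int) i =>
        let bin_size : Int := base + (if i < rem then 1 else 0)
        let bin_end : Int := st.2 + bin_size - 1
        (st.1 ++ [(st.2, bin_end)], bin_end + 1))
      (acc, s + j * base + min j rem)).1
    = acc ++ (PySem.List.pyRange j (j + fuel) 1).map
        (fun i => (s + i * base + min i rem,
                   s + (i + 1) * base + min (i + 1) rem - 1)) := by
  intro fuel
  induction fuel with
  | zero =>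
    intro j acc
    rw [PySem.List.pyRange_one_eq_nil (by omega)]
    simp
  | succ f ih =>
    intro j acc
    rw [PySem.List.pyRange_one_cons (by omega : j < j + (f + 1 : Nat))]
    simp only [List.foldl_cons, List.map_cons]
    have hnext : s + j * base + min j rem + (base + (if j < rem then 1 else 0)) - 1 + 1
        = s + (j + 1) * base + min (j + 1) rem := by
      by_cases h : j < rem <;> simp [h] <;> [skip; skip] <;> ring_nf <;> omega
    have harr : (j : Int) + (f + 1 : Nat) = (j + 1) + (f : Nat) := by push_cast; ring
    have hend : s + j * base + min j rem + (base + (if j < rem then 1 else 0)) - 1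
        = s + (j + 1) * base + min (j + 1) rem - 1 := by omega
    rw [harr, hnext, hend]
    have := ih (j + 1) (acc ++ [(s + j * base + min j rem, s + (j + 1) * base + min (j + 1) rem - 1)])
    simp only [List.append_assoc, List.singleton_append] at this ⊢
    exact this

-- ===== VERDICT (by name: the statement is the Claim_ definition above) =====
theorem split_period_spec : Claim_equal_split_period := by
  intro s e w _hdom hpre
  unfold Spec_split_period split_period split_period_alt
  dsimp only
  set n : Int := -(PySem.Int.floordiv (-(e - s + 1)) w) with hn
  by_cases hpos : 0 < n
  · set base : Int := PySem.Int.floordiv (e - s + 1) n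
    set rem : Int := PySem.Int.mod (e - s + 1) n
    have hrem : 0 ≤ rem := PySem.Int.mod_nonneg (e - s + 1) hpos
    have hfuel : (n : Int) = 0 + (n.toNat : Int) := by omega
    have := split_loop_eq base rem s n.toNat 0 []
    simp only [List.nil_append] at this
    have hinit : s + 0 * base + min 0 rem = s := by
      rw [min_eq_left hrem]; ring
    rw [hfuel]
    rw [hinit] at this
    simpa using this
  · -- n ≤ 0: the range is empty, both sides are []
    rw [PySem.List.pyRange_one_eq_nil (by omega : n ≤ 0)]
    simp
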